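-- pv_equiv track=rewrite | github.com/photoarchive2004-beep/idea_pipl_stB | tools/run_c1.py | choose_hint
-- ===== SOURCE A (Python) =====
-- from typing import Any, Dict, Iterable, List, Optional, Tuple
--
-- def classify_pdf_url(url: str) -> str:
--     u = (url or "").lower()
--     high_tokens = ["pmc", "pubmedcentral", "arxiv.org", "zenodo.org", "hal.science", "repository", "eprints", "figshare", "osf.io"]
--     low_tokens = ["sciencedirect", "wiley", "oup", "elsevier", "springer", "nature.com", "tandfonline", "linkinghub", "pdfdirect"]
--     if any(t in u for t in high_tokens):
--         return "HIGH"
--     if any(t in u for t in low_tokens):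
--         return "LOW"
--     if u:
--         return "MED"
--     return "NONE"
--
-- def choose_hint(urls: List[str]) -> str:
--     if not urls:
--         return "NONE"
--     ranks = [classify_pdf_url(x) for x in urls]
--     if "HIGH" in ranks:
--         return "HIGH"
--     if "MED" in ranks:
--         return "MED"
--     if "LOW" in ranks:
--         return "LOW"
--     return "NONE"
-- ===== SOURCE B (Python) =====
-- def classify_pdf_url(url: str) -> str:
--     u = (url or "").lower()
--     high_tokens = ["pmc", "pubmedcentral", "arxiv.org", "zenodo.org", "hal.science", "repository", "eprints", "figshare", "osf.io"]
--     low_tokens = ["sciencedirect", "wiley", "oup", "elsevier", "springer", "nature.com", "tandfonline", "linkinghub", "pdfdirect"]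
--     if any(t in u for t in high_tokens):
--         return "HIGH"
--     if any(t in u for t in low_tokens):
--         return "LOW"
--     if u:
--         return "MED"
--     return "NONE"
--
-- def choose_hint(urls):
--     prio = {'NONE': 0, 'LOW': 1, 'MED': 2, 'HIGH': 3}
--     best = 0
--     for u in urls:
--         best = max(best, prio[classify_pdf_url(u)])
--         if best == 3:
--             break
--     if best == 3:
--         return 'HIGH'
--     if best == 2:
--         return 'MED'
--     if best == 1:
--         return 'LOW'
--     return 'NONE'
-- ===== Notes on version B (the rewrite author's own statement) =====
-- stated objective: alternative
-- what changed: Replaces the building of a full ranks list plus three sequential membership scans by one reducing pass that tracks the maximum priority (NONE<LOW<MED<HIGH with A's MED-over-LOW order) and breaks early on HIGH, then translates the maximum back to its label.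
import Mathlib
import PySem

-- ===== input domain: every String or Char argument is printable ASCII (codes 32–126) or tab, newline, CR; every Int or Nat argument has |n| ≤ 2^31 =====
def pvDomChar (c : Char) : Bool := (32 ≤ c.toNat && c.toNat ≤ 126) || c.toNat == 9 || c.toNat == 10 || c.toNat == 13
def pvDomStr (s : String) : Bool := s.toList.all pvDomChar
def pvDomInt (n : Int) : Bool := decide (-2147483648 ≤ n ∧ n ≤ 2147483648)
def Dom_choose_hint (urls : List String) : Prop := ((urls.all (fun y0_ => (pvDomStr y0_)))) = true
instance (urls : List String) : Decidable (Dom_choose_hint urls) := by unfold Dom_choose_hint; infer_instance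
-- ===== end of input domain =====

-- B replaces A's ranks list + three membership scans by one max-priority pass with early break on HIGH (alternative decomposition, same cost).

-- ===== PORT A =====
def pvHighTokens : List String :=
  ["pmc", "pubmedcentral", "arxiv.org", "zenodo.org", "hal.science", "repository", "eprints", "figshare", "osf.io"]
def pvLowTokens : List String :=
  ["sciencedirect", "wiley", "oup", "elsevier", "springer", "nature.com", "tandfonline", "linkinghub", "pdfdirect"]

-- (url or "") = url for url : String when url ≠ "", and lower "" = "" anyway, so `u = lower url` is exact.
def classify_pdf_url (url : String) : String :=
  let u := PySem.Str.lower url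
  if pvHighTokens.any (fun t => PySem.Str.isIn t u) then "HIGH"
  else if pvLowTokens.any (fun t => PySem.Str.isIn t u) then "LOW"
  else if u ≠ "" then "MED"
  else "NONE"

def choose_hint (urls : List String) : String :=
  if urls = [] then "NONE"
  else
    let ranks := urls.map classify_pdf_url
    if "HIGH" ∈ ranks then "HIGH"
    else if "MED" ∈ ranks then "MED"
    else if "LOW" ∈ ranks then "LOW"
    else "NONE"

-- ===== PORT B =====
def pvPrio : PySem.Dict String Nat :=
  PySem.Dict.ofList [("NONE", 0), ("LOW", 1), ("MED", 2), ("HIGH", 3)]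

def pvPrioOf (u : String) : Nat := pvPrio.getD (classify_pdf_url u) 0

-- the `for` loop of Source B with its `break` on best == 3
def pvBestLoop : List String → Nat → Nat
  | [], best => best
  | u :: rest, best =>
    let best' := Nat.max best (pvPrioOf u)
    if best' = 3 then best' else pvBestLoop rest best'

def choose_hint_alt (urls : List String) : String :=
  let best := pvBestLoop urls 0
  if best = 3 then "HIGH"
  else if best = 2 then "MED"
  else if best = 1 then "LOW"
  else "NONE"

-- ===== PRECONDITION & SPEC =====
def Spec_choose_hint (urls : List String) (out : String) : Prop := out = choose_hint_alt urls
instance (urls : List String) (out : String) : Decidable (Spec_choose_hint urls out) := by unfold Spec_choose_hint; infer_instance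

-- ===== CLAIM (what is proved, stated in full; the proofs are below) =====
def Claim_equal_choose_hint : Prop := ∀ (urls : List String), Dom_choose_hint urls → Spec_choose_hint urls (choose_hint urls)

-- ===== LEMMAS AND PROOFS =====

-- maximum priority over the list (proof-side abstraction of B's loop)
def pvM (urls : List String) : Nat := urls.foldr (fun u a => Nat.max (pvPrioOf u) a) 0

theorem classify_cases (u : String) :
    classify_pdf_url u = "HIGH" ∨ classify_pdf_url u = "LOW" ∨
    classify_pdf_url u = "MED" ∨ classify_pdf_url u = "NONE" := by
  unfold classify_pdf_url
  dsimp only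
  split_ifs <;> simp

theorem prio_spec (u : String) :
    pvPrioOf u ≤ 3 ∧
    (pvPrioOf u = 3 ↔ classify_pdf_url u = "HIGH") ∧
    (pvPrioOf u = 2 ↔ classify_pdf_url u = "MED") ∧
    (pvPrioOf u = 1 ↔ classify_pdf_url u = "LOW") := by
  rcases classify_cases u with h | h | h | h <;>
    simp only [pvPrioOf, h] <;> refine ⟨by decide, ?_, ?_, ?_⟩ <;> simp <;> decide

theorem pvM_le_3 (urls : List String) : pvM urls ≤ 3 := by
  induction urls with
  | nil => simp [pvM]
  | cons u rest ih =>
    have hp := (prio_spec u).1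
    simp only [pvM, List.foldr] at *
    exact Nat.max_le.mpr ⟨hp, ih⟩

theorem pvBestLoop_eq (urls : List String) (b : Nat) (hb : b ≤ 3) :
    pvBestLoop urls b = Nat.max b (pvM urls) := by
  induction urls generalizing b with
  | nil => simp [pvBestLoop, pvM]
  | cons u rest ih =>
    have hp := (prio_spec u).1
    have hr := pvM_le_3 rest
    simp only [pvM, List.foldr] at *
    show (if Nat.max b (pvPrioOf u) = 3 then Nat.max b (pvPrioOf u)
          else pvBestLoop rest (Nat.max b (pvPrioOf u))) = _
    split_ifs with h
    . have h1 : Nat.max b (pvPrioOf u) ≤ Nat.max b (Nat.max (pvPrioOf u) (pvM rest)) :=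
        max_le_max (Nat.le_refl b) (Nat.le_max_left _ _)
      have h2 : Nat.max b (Nat.max (pvPrioOf u) (pvM rest)) ≤ 3 :=
        Nat.max_le.mpr ⟨hb, Nat.max_le.mpr ⟨hp, hr⟩⟩
      simp only [pvM] at *
      omega
    . rw [ih _ (Nat.max_le.mpr ⟨hb, hp⟩)]
      exact Nat.max_assoc b (pvPrioOf u) _

theorem prio_le_M (urls : List String) (u : String) (hu : u ∈ urls) :
    pvPrioOf u ≤ pvM urls := by
  induction urls with
  | nil => cases hu
  | cons v rest ih =>
    rcases List.mem_cons.mp hu with h | h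
    . subst h; exact Nat.le_max_left _ _
    . exact le_trans (ih h) (Nat.le_max_right _ _)

theorem le_M_iff (urls : List String) (k : Nat) (hk : 1 ≤ k) :
    k ≤ pvM urls ↔ ∃ u ∈ urls, k ≤ pvPrioOf u := by
  induction urls with
  | nil => simp [pvM]; omega
  | cons u rest ih =>
    have hstep : pvM (u :: rest) = Nat.max (pvPrioOf u) (pvM rest) := rfl
    rw [hstep, le_max_iff]
    constructor
    . rintro (h | h)
      . exact ⟨u, by simp, h⟩
      . obtain ⟨v, hv, hvk⟩ := ih.mp h
        exact ⟨v, by simp [hv], hvk⟩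
    . rintro ⟨v, hv, hvk⟩
      rcases List.mem_cons.mp hv with h | h
      . subst h; exact Or.inl hvk
      . exact Or.inr (ih.mpr ⟨v, h, hvk⟩)

theorem mem_high_iff (urls : List String) :
    "HIGH" ∈ urls.map classify_pdf_url ↔ 3 ≤ pvM urls := by
  rw [le_M_iff urls 3 (by omega)]
  simp only [List.mem_map]
  constructor
  . rintro ⟨u, hu, hc⟩
    exact ⟨u, hu, Nat.le_of_eq ((prio_spec u).2.1.mpr hc).symm⟩
  . rintro ⟨u, hu, h⟩
    have h1 := (prio_spec u).1
    exact ⟨u, hu, (prio_spec u).2.1.mp (by omega)⟩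

theorem mem_med_iff (urls : List String) :
    "MED" ∈ urls.map classify_pdf_url ↔ ∃ u ∈ urls, pvPrioOf u = 2 := by
  simp only [List.mem_map]
  constructor
  . rintro ⟨u, hu, hc⟩
    exact ⟨u, hu, (prio_spec u).2.2.1.mpr hc⟩
  . rintro ⟨u, hu, h⟩
    exact ⟨u, hu, (prio_spec u).2.2.1.mp h⟩

theorem mem_low_iff (urls : List String) :
    "LOW" ∈ urls.map classify_pdf_url ↔ ∃ u ∈ urls, pvPrioOf u = 1 := by
  simp only [List.mem_map]
  constructor
  . rintro ⟨u, hu, hc⟩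
    exact ⟨u, hu, (prio_spec u).2.2.2.mpr hc⟩
  . rintro ⟨u, hu, h⟩
    exact ⟨u, hu, (prio_spec u).2.2.2.mp h⟩

-- ===== VERDICT (by name: the statement is the Claim_ definition above) =====
theorem choose_hint_spec : Claim_equal_choose_hint := by
  intro urls _
  unfold Spec_choose_hint choose_hint choose_hint_alt
  dsimp only
  rw [pvBestLoop_eq urls 0 (by omega),
    show Nat.max 0 (pvM urls) = pvM urls from Nat.zero_max _]
  by_cases he : urls = []
  . subst he; simp [pvM]
  . simp only [he, if_false]
    have hM := pvM_le_3 urls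
    have hH := mem_high_iff urls
    have hMd := mem_med_iff urls
    have hL := mem_low_iff urls
    have hcase : pvM urls = 0 ∨ pvM urls = 1 ∨ pvM urls = 2 ∨ pvM urls = 3 := by omega
    rcases hcase with h | h | h | h <;> rw [h]
    . have h1 : ¬ ("HIGH" ∈ urls.map classify_pdf_url) := by rw [hH]; omega
      have h2 : ¬ ("MED" ∈ urls.map classify_pdf_url) := by
        rw [hMd]; rintro ⟨u, hu, hpu⟩; have := prio_le_M urls u hu; omega
      have h3 : ¬ ("LOW" ∈ urls.map classify_pdf_url) := by
        rw [hL]; rintro ⟨u, hu, hpu⟩; have := prio_le_M urls u hu; omega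
      simp [h1, h2, h3]
    . have h1 : ¬ ("HIGH" ∈ urls.map classify_pdf_url) := by rw [hH]; omega
      have h2 : ¬ ("MED" ∈ urls.map classify_pdf_url) := by
        rw [hMd]; rintro ⟨u, hu, hpu⟩; have := prio_le_M urls u hu; omega
      have h3 : ("LOW" ∈ urls.map classify_pdf_url) := by
        rw [hL]
        obtain ⟨u, hu, hk⟩ := (le_M_iff urls 1 (by omega)).mp (by omega)
        exact ⟨u, hu, by have := prio_le_M urls u hu; omega⟩
      simp [h1, h2, h3]
    . have h1 : ¬ ("HIGH" ∈ urls.map classify_pdf_url) := by rw [hH]; omega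
      have h2 : ("MED" ∈ urls.map classify_pdf_url) := by
        rw [hMd]
        obtain ⟨u, hu, hk⟩ := (le_M_iff urls 2 (by omega)).mp (by omega)
        exact ⟨u, hu, by have := prio_le_M urls u hu; omega⟩
      simp [h1, h2]
    . have h1 : ("HIGH" ∈ urls.map classify_pdf_url) := by rw [hH]; omega
      simp [h1]
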